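-- pv_equiv track=rewrite | github.com/gabrielegrillo/Fondamenti1-Unical | ES1.py | divisoriuguali
-- ===== SOURCE A (Python) =====
-- def divisoriuguali(x,y):
--
--     for i in range(1,x):
--         numdiv = 0
--         for j in range(1,i):
--             if (i % j == 0):
--                 numdiv += 1
--         if (numdiv == y):
--             return 'OK2'
--
--     return 'NO2'
-- ===== SOURCE B (Python) =====
-- def divisoriuguali(x, y):
--     for i in range(1, x):
--         cnt = 0
--         j = 1
--         while j * j <= i:
--             if i % j == 0:
--                 cnt += 1 if j * j == i else 2
--             j += 1
--         if cnt - 1 == y: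
--             return 'OK2'
--     return 'NO2'
-- ===== Notes on version B (the rewrite author's own statement) =====
-- stated objective: faster
-- what changed: B counts each i's proper divisors by enumerating divisor pairs up to sqrt(i) (adding 1 or 2 per hit, minus 1 for i itself) instead of trial-dividing by every j < i.
import Mathlib
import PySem

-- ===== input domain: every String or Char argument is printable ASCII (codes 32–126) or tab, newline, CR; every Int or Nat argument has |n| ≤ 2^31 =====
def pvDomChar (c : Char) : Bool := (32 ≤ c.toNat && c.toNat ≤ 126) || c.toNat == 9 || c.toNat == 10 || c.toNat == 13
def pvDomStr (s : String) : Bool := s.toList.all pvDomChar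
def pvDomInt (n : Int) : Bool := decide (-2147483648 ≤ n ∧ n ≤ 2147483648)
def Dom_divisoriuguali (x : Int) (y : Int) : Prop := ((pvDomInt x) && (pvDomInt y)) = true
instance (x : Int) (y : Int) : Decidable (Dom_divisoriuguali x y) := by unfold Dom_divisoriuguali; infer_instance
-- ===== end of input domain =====

-- B replaces A's O(i) inner trial-division loop with an O(sqrt i) divisor-pair count; same outer search.

-- ===== PORT A =====
-- inner loop of A: numdiv accumulated over j in range(1, i)
def pvACount (i : Int) : Int :=
  (PySem.List.pyRange 1 i 1).foldl (fun c j => if PySem.Int.mod i j = 0 then c + 1 else c) 0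

-- outer loop of A with early return
def pvALoop (y : Int) : List Int → String
  | [] => "NO2"
  | i :: rest => if pvACount i = y then "OK2" else pvALoop y rest

def divisoriuguali (x : Int) (y : Int) : String :=
  pvALoop y (PySem.List.pyRange 1 x 1)

-- ===== PORT B =====
-- B's while loop: j from 1 while j*j <= i, counting 1 (if j*j == i) or 2 per divisor j
-- (structural recursion on a fuel bound; i.toNat + 1 iterations always suffice, see pvBGoF_eq)
def pvBGoF : Nat → Int → Nat → Int → Int
  | 0, _, _, c => c
  | fuel + 1, i, j, c =>
    if (j : Int) * (j : Int) ≤ i then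
      pvBGoF fuel i (j + 1)
        (if PySem.Int.mod i (j : Int) = 0 then
          (if (j : Int) * (j : Int) = i then c + 1 else c + 2) else c)
    else c

def pvBGo (i : Int) (j : Nat) (c : Int) : Int := pvBGoF (i.toNat + 1) i j c

-- outer loop of B with early return
def pvBLoop (y : Int) : List Int → String
  | [] => "NO2"
  | i :: rest => if pvBGo i 1 0 - 1 = y then "OK2" else pvBLoop y rest

def divisoriuguali_alt (x : Int) (y : Int) : String :=
  pvBLoop y (PySem.List.pyRange 1 x 1)

-- ===== PRECONDITION & SPEC =====
def Spec_divisoriuguali (x : Int) (y : Int) (out : String) : Prop := out = divisoriuguali_alt x y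
instance (x : Int) (y : Int) (out : String) : Decidable (Spec_divisoriuguali x y out) := by unfold Spec_divisoriuguali; infer_instance

-- ===== CLAIM (what is proved, stated in full; the proofs are below) =====
def Claim_equal_divisoriuguali : Prop := ∀ (x : Int) (y : Int), Dom_divisoriuguali x y → Spec_divisoriuguali x y (divisoriuguali x y)

-- ===== LEMMAS AND PROOFS =====

-- fold-as-count for A's inner loop
theorem pv_foldl_count (p : Int → Prop) [DecidablePred p] (l : List Int) (c : Int) :
    l.foldl (fun c j => if p j then c + 1 else c) c = c + (l.countP (fun j => decide (p j)) : Int) := by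
  induction l generalizing c with
  | nil => simp
  | cons a l ih => by_cases h : p a <;> simp [List.countP_cons, h, ih] <;> push_cast <;> ring

-- weight contributed by j in B's sqrt loop (Nat level)
def pvW (n k : Nat) : Int := if n % k = 0 then (if k * k = n then 1 else 2) else 0

theorem pvBGoF_eq (n : Nat) : ∀ (fuel : Nat) (j : Nat) (c : Int), Nat.sqrt n + 1 - j < fuel →
    pvBGoF fuel (n : Int) j c = c + ((List.range' j (Nat.sqrt n + 1 - j)).map (pvW n)).sum := by
  intro fuel
  induction fuel with
  | zero => intro j c hk; omega
  | succ fuel ihf =>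
    intro j c hk
    by_cases hsq : j ≤ Nat.sqrt n
    · have hjn : j * j ≤ n := Nat.le_sqrt.1 hsq
      have h : (j:Int) * (j:Int) ≤ (n:Int) := by exact_mod_cast hjn
      rw [pvBGoF, if_pos h, ihf (j+1) _ (by omega)]
      have hlen : Nat.sqrt n + 1 - j = (Nat.sqrt n + 1 - (j+1)) + 1 := by omega
      rw [hlen, List.range'_succ, List.map_cons, List.sum_cons]
      simp only [PySem.Int.mod_natCast, Nat.cast_eq_zero, pvW,
        show ((j:Int)*(j:Int) = (n:Int)) ↔ j*j = n from by exact_mod_cast Iff.rfl]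
      split_ifs <;> ring
    · have hnle : ¬ ((j:Int) * (j:Int) ≤ (n:Int)) := by
        intro hc
        have : j * j ≤ n := by exact_mod_cast hc
        exact hsq (Nat.le_sqrt.2 this)
      rw [pvBGoF, if_neg hnle]
      have h0 : Nat.sqrt n + 1 - j = 0 := by omega
      simp [h0]

theorem pvBGo_eq (n j : Nat) (c : Int) (hj : 1 ≤ j) :
    pvBGo (n : Int) j c = c + ((List.range' j (Nat.sqrt n + 1 - j)).map (pvW n)).sum := by
  have hs : Nat.sqrt n ≤ n := Nat.sqrt_le_self n
  exact pvBGoF_eq n (n + 1) j c (by simp; omega)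

-- A's inner count, characterized as a divisor count
theorem pvACount_eq (n : Nat) :
    pvACount (n : Int) = ((List.range' 1 (n - 1)).countP (fun j => decide (j ∣ n)) : Int) := by
  unfold pvACount
  rw [pv_foldl_count (fun j => PySem.Int.mod (n:Int) j = 0)]
  rw [PySem.List.pyRange_one, List.range'_eq_map_range]
  rw [List.countP_map, List.countP_map]
  have hn : ((n:Int) - 1).toNat = n - 1 := by omega
  rw [hn]
  rw [zero_add]
  congr 1
  apply List.countP_congr
  intro k _
  have hc : (1:Int) + (k:Int) = ((1 + k : Nat) : Int) := by push_cast; ring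
  simp only [Function.comp, decide_eq_true_eq, hc, PySem.Int.mod_natCast, Nat.cast_eq_zero]
  exact ⟨fun h => (Nat.dvd_iff_mod_eq_zero).2 h, fun h => (Nat.dvd_iff_mod_eq_zero).1 h⟩

-- main identity: pair-count = proper-divisor count + 1
theorem pv_sum_split (n : Nat) (l : List Nat) :
    (l.map (pvW n)).sum
      = (l.countP (fun j => decide (j ∣ n)) : Int)
        + (l.countP (fun j => decide (j ∣ n ∧ j * j ≠ n)) : Int) := by
  induction l with
  | nil => simp
  | cons a l ih =>
    have hd : (n % a = 0) ↔ a ∣ n :=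
      ⟨fun h => (Nat.dvd_iff_mod_eq_zero).2 h, fun h => (Nat.dvd_iff_mod_eq_zero).1 h⟩
    simp only [List.map_cons, List.sum_cons, List.countP_cons, ih, pvW, hd]
    by_cases h1 : a ∣ n <;> by_cases h2 : a * a = n <;>
      simp [h1, h2] <;> push_cast <;> ring

theorem pv_countP_toFinset (l : List Nat) (hl : l.Nodup) (p : Nat → Prop) [DecidablePred p] :
    l.countP (fun a => decide (p a)) = (l.toFinset.filter p).card := by
  rw [List.countP_eq_length_filter, ← List.toFinset_card_of_nodup (hl.filter _), List.toFinset_filter]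
  congr 1
  apply Finset.filter_congr
  intro a _
  simp

theorem pv_card_main (n : Nat) (hn : 1 ≤ n) :
    ((List.range' 1 (Nat.sqrt n)).toFinset.filter (fun j => j ∣ n)).card
      + ((List.range' 1 (Nat.sqrt n)).toFinset.filter (fun j => j ∣ n ∧ j * j ≠ n)).card
    = ((List.range' 1 (n - 1)).toFinset.filter (fun j => j ∣ n)).card + 1 := by
  set P := (List.range' 1 (n - 1)).toFinset.filter (fun j => j ∣ n) with hPdef
  have hnP : n ∉ P := by simp [hPdef, List.mem_range'_1]; omega
  have hD : P.card + 1 = (insert n P).card := (Finset.card_insert_of_notMem hnP).symm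
  set D := insert n P with hDdef
  have hmemD : ∀ j, j ∈ D ↔ 1 ≤ j ∧ j ≤ n ∧ j ∣ n := by
    intro j
    simp only [hDdef, hPdef, Finset.mem_insert, Finset.mem_filter, List.mem_toFinset,
      List.mem_range'_1]
    constructor
    · rintro (rfl | ⟨⟨h1, h2⟩, h3⟩)
      · exact ⟨hn, le_rfl, dvd_rfl⟩
      · exact ⟨h1, by omega, h3⟩
    · rintro ⟨h1, h2, h3⟩
      rcases eq_or_lt_of_le h2 with rfl | hlt
      · exact Or.inl rfl
      · exact Or.inr ⟨⟨h1, by omega⟩, h3⟩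
  have hsplit := Finset.filter_card_add_filter_neg_card_eq_card
    (s := D) (p := fun j => j ≤ Nat.sqrt n)
  have hS : D.filter (fun j => j ≤ Nat.sqrt n)
      = (List.range' 1 (Nat.sqrt n)).toFinset.filter (fun j => j ∣ n) := by
    apply Finset.ext
    intro j
    simp only [Finset.mem_filter, hmemD, List.mem_toFinset, List.mem_range'_1]
    constructor
    · rintro ⟨⟨h1, h2, h3⟩, h4⟩
      exact ⟨⟨h1, by omega⟩, h3⟩
    · rintro ⟨⟨h1, h2⟩, h3⟩
      exact ⟨⟨h1, le_trans (by omega) (Nat.sqrt_le_self n), h3⟩, by omega⟩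
  have hT : (D.filter (fun j => ¬ j ≤ Nat.sqrt n)).card
      = ((List.range' 1 (Nat.sqrt n)).toFinset.filter (fun j => j ∣ n ∧ j * j ≠ n)).card := by
    apply Finset.card_bij' (fun d _ => n / d) (fun a _ => n / a)
    · -- hi : maps into T
      intro d hd
      simp only [Finset.mem_filter, hmemD] at hd
      obtain ⟨⟨hd1, hd2, hd3⟩, hd4⟩ := hd
      have hdn : d * (n / d) = n := Nat.mul_div_cancel' hd3
      have hle : n / d ≤ Nat.sqrt n := by
        by_contra hc
        have h1 : Nat.sqrt n + 1 ≤ d := by omega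
        have h2 : Nat.sqrt n + 1 ≤ n / d := by omega
        have := Nat.mul_le_mul h1 h2
        rw [hdn] at this
        have hls : n < (Nat.sqrt n + 1) * (Nat.sqrt n + 1) := by
          simpa [Nat.succ_eq_add_one] using Nat.lt_succ_sqrt n
        omega
      have hpos : 1 ≤ n / d := Nat.div_pos hd2 (by omega)
      have hne : (n / d) * (n / d) ≠ n := by
        intro hsq
        have : d * (n / d) = (n / d) * (n / d) := by rw [hdn, hsq]
        have hdd : d = n / d := Nat.eq_of_mul_eq_mul_right (by omega) this
        omega
      simp only [Finset.mem_filter, List.mem_toFinset, List.mem_range'_1]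
      exact ⟨⟨hpos, by omega⟩, Nat.div_dvd_of_dvd hd3, hne⟩
    · -- hj : maps back into D-filter
      intro a ha
      simp only [Finset.mem_filter, List.mem_toFinset, List.mem_range'_1] at ha
      obtain ⟨⟨ha1, ha2⟩, ha3, ha4⟩ := ha
      have han : a * (n / a) = n := Nat.mul_div_cancel' ha3
      have hsqa : a ≤ Nat.sqrt n := by omega
      have hgt : Nat.sqrt n < n / a := by
        by_contra hc
        push_neg at hc
        have hs1 : Nat.sqrt n * Nat.sqrt n ≤ n := Nat.sqrt_le n
        have h2 : n ≤ a * Nat.sqrt n := by calc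
          n = a * (n / a) := han.symm
          _ ≤ a * Nat.sqrt n := Nat.mul_le_mul_left a hc
        have h3 : Nat.sqrt n * Nat.sqrt n ≤ a * Nat.sqrt n := le_trans hs1 h2
        have hsp : 0 < Nat.sqrt n := Nat.sqrt_pos.2 (by omega)
        have h4 : Nat.sqrt n ≤ a := Nat.le_of_mul_le_mul_right h3 hsp
        have h5 : a = Nat.sqrt n := le_antisymm hsqa h4
        have h6 : a * a ≤ n := by nlinarith
        have h7 : n ≤ a * a := by calc
          n = a * (n / a) := han.symm
          _ ≤ a * a := Nat.mul_le_mul_left a (by omega)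
        omega
      simp only [Finset.mem_filter, hmemD]
      exact ⟨⟨by omega, Nat.div_le_self n a, Nat.div_dvd_of_dvd ha3⟩, by omega⟩
    · -- left inverse
      intro d hd
      simp only [Finset.mem_filter, hmemD] at hd
      exact Nat.div_div_self hd.1.2.2 (by omega)
    · -- right inverse
      intro a ha
      simp only [Finset.mem_filter, List.mem_toFinset, List.mem_range'_1] at ha
      exact Nat.div_div_self ha.2.1 (by omega)
  rw [hD, ← hsplit, hS, hT]

theorem pv_main (n : Nat) (hn : 1 ≤ n) : pvBGo (n : Int) 1 0 = pvACount (n : Int) + 1 := by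
  rw [pvBGo_eq n 1 0 (le_refl 1), pvACount_eq n, zero_add]
  have h1 : Nat.sqrt n + 1 - 1 = Nat.sqrt n := by omega
  rw [h1, pv_sum_split]
  have hnd1 : (List.range' 1 (Nat.sqrt n)).Nodup := List.nodup_range'
  have hnd2 : (List.range' 1 (n - 1)).Nodup := List.nodup_range'
  rw [pv_countP_toFinset _ hnd1 (fun j => j ∣ n),
      pv_countP_toFinset _ hnd1 (fun j => j ∣ n ∧ j * j ≠ n),
      pv_countP_toFinset _ hnd2 (fun j => j ∣ n)]
  have := pv_card_main n hn
  push_cast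
  omega

theorem pv_loop_eq (y : Int) (l : List Int) (h : ∀ i ∈ l, 1 ≤ i) : pvALoop y l = pvBLoop y l := by
  induction l with
  | nil => rfl
  | cons i rest ih =>
    have hi : 1 ≤ i := h i (List.mem_cons_self ..)
    have hcast : ((i.toNat : Nat) : Int) = i := by omega
    have := pv_main i.toNat (by omega)
    rw [hcast] at this
    simp only [pvALoop, pvBLoop, this]
    have : pvACount i + 1 - 1 = pvACount i := by ring
    rw [this]
    split
    · rfl
    · exact ih fun j hj => h j (List.mem_cons_of_mem _ hj)

-- ===== VERDICT (by name: the statement is the Claim_ definition above) =====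
theorem divisoriuguali_spec : Claim_equal_divisoriuguali := by
  intro x y _
  unfold Spec_divisoriuguali divisoriuguali divisoriuguali_alt
  exact pv_loop_eq y _ (fun i hi => ((PySem.List.mem_pyRange_one).1 hi).1)
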